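-- pv_equiv track=rewrite | github.com/Angela-OH/Algorithm | 프로그래머스/Lv.3/12979.py | solution
-- ===== SOURCE A (Python) =====
-- def solution(n, stations, w):
--     start = 1
--     answer = 0
--     while stations:
--         station = stations.pop(0)
--         end = station - w
--         if start < end:
--             count = end - start
--             answer += count // (2 * w + 1)
--             if count % (2 * w + 1) != 0:
--                 answer += 1
--         start = station + w + 1
--
--     if start <= n:
--         count = n + 1 - start
--         answer += count // (2 * w + 1)
--         if count % (2 * w + 1) != 0:
--             answer += 1
--
--     return answer
-- ===== SOURCE B (Python) =====
-- def solution(n, stations, w):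
--     d = 2 * w + 1
--     gaps = []
--     start = 1
--     for station in stations:
--         gap = station - w - start
--         if gap > 0:
--             gaps.append(gap)
--         start = station + w + 1
--     tail = n + 1 - start
--     if tail > 0:
--         gaps.append(tail)
--     return sum(-(-g // d) for g in gaps)
-- ===== Notes on version B (the rewrite author's own statement) =====
-- stated objective: faster
-- what changed: A counts inside one interleaved while/pop(0) scan (quadratic from pop(0)) with a floor-division-plus-remainder bump per gap; B builds the explicit list of positive uncovered gap lengths in one linear pass (trailing gap as just another entry) and then reduces it with ceiling division -(-g // (2w+1)).
import Mathlib
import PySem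

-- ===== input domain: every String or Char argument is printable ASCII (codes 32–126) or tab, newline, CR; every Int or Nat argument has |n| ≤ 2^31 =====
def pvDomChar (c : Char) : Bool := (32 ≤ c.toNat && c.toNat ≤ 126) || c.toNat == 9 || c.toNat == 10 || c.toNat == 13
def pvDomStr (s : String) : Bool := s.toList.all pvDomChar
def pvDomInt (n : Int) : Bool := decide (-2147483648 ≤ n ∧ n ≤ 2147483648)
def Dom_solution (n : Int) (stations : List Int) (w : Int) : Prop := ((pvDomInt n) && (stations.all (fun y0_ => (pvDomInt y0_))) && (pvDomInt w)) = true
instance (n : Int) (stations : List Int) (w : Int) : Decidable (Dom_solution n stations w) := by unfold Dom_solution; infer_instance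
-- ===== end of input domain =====

-- B builds the list of uncovered gap lengths first, then sums ceil-divisions -(-g // (2w+1));
-- A interleaves the counting into one scan. Equivalence is about the RETURN value only:
-- Python A empties the `stations` list in place (pop(0)), B does not mutate it.

-- ===== PORT A =====
-- the while/pop(0) loop: state (start, answer); returns the final pair
def solGoA (w : Int) : List Int → Int → Int → Int × Int
  | [], start, answer => (start, answer)
  | st :: rest, start, answer =>
    let e := st - w
    let answer' :=
      if start < e then
        let c := e - start
        let a := answer + PySem.Int.floordiv c (2 * w + 1)
        if PySem.Int.mod c (2 * w + 1) ≠ 0 then a + 1 else a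
      else answer
    solGoA w rest (st + w + 1) answer'

def solution (n : Int) (stations : List Int) (w : Int) : Int :=
  let p := solGoA w stations 1 0
  if p.1 ≤ n then
    let c := n + 1 - p.1
    let a := p.2 + PySem.Int.floordiv c (2 * w + 1)
    if PySem.Int.mod c (2 * w + 1) ≠ 0 then a + 1 else a
  else p.2

-- ===== PORT B =====
def solution_alt (n : Int) (stations : List Int) (w : Int) : Int :=
  let d := 2 * w + 1
  let p := stations.foldl
    (fun (acc : List Int × Int) st =>
      let gap := st - w - acc.2
      (if gap > 0 then acc.1 ++ [gap] else acc.1, st + w + 1))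
    ([], 1)
  let tail := n + 1 - p.2
  let gaps := if tail > 0 then p.1 ++ [tail] else p.1
  (gaps.map (fun g => -(PySem.Int.floordiv (-g) d))).sum

-- ===== PRECONDITION & SPEC =====
def Spec_solution (n : Int) (stations : List Int) (w : Int) (out : Int) : Prop := out = solution_alt n stations w
instance (n : Int) (stations : List Int) (w : Int) (out : Int) : Decidable (Spec_solution n stations w out) := by unfold Spec_solution; infer_instance

-- ===== CLAIM (what is proved, stated in full; the proofs are below) =====
def Claim_equal_solution : Prop := ∀ (n : Int) (stations : List Int) (w : Int), Dom_solution n stations w → Spec_solution n stations w (solution n stations w)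

-- ===== LEMMAS AND PROOFS =====

-- floor division plus the nonzero-remainder bump equals ceiling division -((-c) // d), for any d ≠ 0
theorem ceil_bump (c d : Int) (hd : d ≠ 0) :
    PySem.Int.floordiv c d + (if PySem.Int.mod c d ≠ 0 then 1 else 0)
      = -(PySem.Int.floordiv (-c) d) := by
  have hdvd := PySem.Int.mod_eq_zero_iff_dvd c d
  simp only [PySem.Int.floordiv, Int.neg_fdiv]
  by_cases h : d ∣ c
  · simp [hd, h, hdvd.mpr h]
  · have hm : PySem.Int.mod c d ≠ 0 := fun he => h (hdvd.mp he)
    simp [hm, hd, h]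
    omega

theorem go_eq (w : Int) (l : List Int) : ∀ (start answer : Int) (gaps : List Int),
    solGoA w l start answer
      = ((l.foldl
           (fun (acc : List Int × Int) st =>
             let gap := st - w - acc.2
             (if gap > 0 then acc.1 ++ [gap] else acc.1, st + w + 1))
           (gaps, start)).2,
         answer
          + (((l.foldl
                (fun (acc : List Int × Int) st =>
                  let gap := st - w - acc.2
                  (if gap > 0 then acc.1 ++ [gap] else acc.1, st + w + 1))
                (gaps, start)).1.map (fun g => -(PySem.Int.floordiv (-g) (2 * w + 1)))).sum
              - ((gaps.map (fun g => -(PySem.Int.floordiv (-g) (2 * w + 1)))).sum))) := by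
  induction l with
  | nil => intro start answer gaps; simp [solGoA]
  | cons st rest ih =>
    intro start answer gaps
    have hd : (2 * w + 1) ≠ 0 := by omega
    simp only [solGoA, List.foldl_cons]
    rw [ih]
    congr 1
    by_cases hg : st - w - start > 0
    · have hlt : start < st - w := by omega
      have := ceil_bump (st - w - start) (2 * w + 1) hd
      simp only [hg, hlt, if_pos, List.map_append, List.sum_append, List.map_cons,
        List.map_nil, List.sum_cons, List.sum_nil]
      split_ifs with h <;> simp [h] at this <;> ring_nf at this ⊢ <;> omega
    · have hlt : ¬ start < st - w := by omega
      simp [hlt]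

theorem solution_eq_alt (n : Int) (stations : List Int) (w : Int) :
    solution n stations w = solution_alt n stations w := by
  have hd : (2 * w + 1) ≠ 0 := by omega
  unfold solution solution_alt
  rw [go_eq w stations 1 0 []]
  simp only [List.map_nil, List.sum_nil, sub_zero, zero_add]
  set p := stations.foldl
      (fun (acc : List Int × Int) st =>
        let gap := st - w - acc.2
        (if gap > 0 then acc.1 ++ [gap] else acc.1, st + w + 1))
      (([] : List Int), (1 : Int)) with hp
  by_cases ht : n + 1 - p.2 > 0
  · have hle : p.2 ≤ n := by omega
    have := ceil_bump (n + 1 - p.2) (2 * w + 1) hd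
    simp only [ht, hle, if_pos, List.map_append, List.sum_append, List.map_cons,
      List.map_nil, List.sum_cons, List.sum_nil]
    split_ifs with h <;> simp [h] at this <;> ring_nf at this ⊢ <;> omega
  · have hle : ¬ p.2 ≤ n := by omega
    simp [hle]

-- ===== VERDICT (by name: the statement is the Claim_ definition above) =====
theorem solution_spec : Claim_equal_solution := by
  intro n stations w _
  unfold Spec_solution
  exact solution_eq_alt n stations w
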